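-- pv_equiv track=rewrite | github.com/huazuhao/policy_gradient_cartpole | vix/model7/ars/trading_vix_and_spy_utils.py | day_counter_helper
-- ===== SOURCE A (Python) =====
-- def day_counter_helper(vix_measure_list,threshold):
--
--     counting_days = []
--     current_episode = []
--     current_counter = 0
--
--     for time_index in range(len(vix_measure_list)-1,0,-1):
--
--         current_measure = vix_measure_list[time_index]
--         previous_measure = vix_measure_list[time_index-1]
--
--         if previous_measure<threshold and current_measure >= threshold:
--             current_counter += 1
--             current_episode.append(current_counter)
--             current_episode = current_episode[::-1]
--             for entry in current_episode:
--                 counting_days.append(entry)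
--             current_counter = 0
--             current_episode = []
--         else:
--             current_counter += 1
--             current_episode.append(current_counter)
--
--     current_episode = current_episode[::-1]
--     for entry in current_episode:
--         counting_days.append(entry)
--
--     counting_days.append(0) #because time index doesn't go back all the way to zero
--     counting_days = counting_days[::-1]
--
--     return counting_days
-- ===== SOURCE B (Python) =====
-- def day_counter_helper(vix_measure_list, threshold):
--     # single forward pass with a running counter; leading 0 matches A's mandatory trailing 0
--     result = [0]
--     last = 0
--     for prev, cur in zip(vix_measure_list, vix_measure_list[1:]):
--         last = 1 if (prev < threshold and cur >= threshold) else last + 1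
--         result.append(last)
--     return result
-- ===== Notes on version B (the rewrite author's own statement) =====
-- stated objective: simpler
-- what changed: Replaces the backward index loop with episode buffering, per-episode reversal and a final whole-list reversal by a single forward zip pass that keeps one running counter and appends directly.
import Mathlib
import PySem

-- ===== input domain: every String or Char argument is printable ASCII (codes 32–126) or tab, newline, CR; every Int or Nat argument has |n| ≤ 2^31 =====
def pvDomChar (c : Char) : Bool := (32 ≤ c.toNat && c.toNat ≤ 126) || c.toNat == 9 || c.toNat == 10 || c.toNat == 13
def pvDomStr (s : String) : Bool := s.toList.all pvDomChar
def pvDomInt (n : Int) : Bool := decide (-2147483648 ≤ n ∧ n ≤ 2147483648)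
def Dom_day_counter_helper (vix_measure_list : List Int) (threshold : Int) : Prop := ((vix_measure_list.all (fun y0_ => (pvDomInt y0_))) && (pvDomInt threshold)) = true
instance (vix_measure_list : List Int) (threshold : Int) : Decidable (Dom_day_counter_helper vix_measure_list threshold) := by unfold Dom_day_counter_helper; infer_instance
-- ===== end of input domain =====

-- B replaces A's backward index loop with episode buffering and reversals by a single
-- forward zip pass keeping one running counter; objective: simpler.

-- ===== PORT A =====
-- one loop-body step of A at index i (indices reached by the loop are always in range,
-- so getD's default is never used)
def stepA (xs : List Int) (t : Int) (i : Nat) (s : List Int × List Int × Int) :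
    List Int × List Int × Int :=
  let current_measure := (PySem.List.pyGet? xs (i : Int)).getD 0
  let previous_measure := (PySem.List.pyGet? xs ((i : Int) - 1)).getD 0
  if previous_measure < t ∧ t ≤ current_measure then
    (s.1 ++ (s.2.1 ++ [s.2.2 + 1]).reverse, [], 0)
  else
    (s.1, s.2.1 ++ [s.2.2 + 1], s.2.2 + 1)

-- for time_index in range(len(vix_measure_list)-1, 0, -1): indices i, i-1, …, 1
def loopA (xs : List Int) (t : Int) : Nat → (List Int × List Int × Int) → List Int × List Int × Int
  | 0, s => s
  | i + 1, s => loopA xs t i (stepA xs t (i + 1) s)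

def day_counter_helper (vix_measure_list : List Int) (threshold : Int) : List Int :=
  let s := loopA vix_measure_list threshold (vix_measure_list.length - 1) ([], [], 0)
  ((s.1 ++ s.2.1.reverse) ++ [0]).reverse

-- ===== PORT B =====
-- for prev, cur in zip(xs, xs[1:]): one cons per step, list built forward
def walkB (t : Int) : Int → Int → List Int → List Int
  | _, _, [] => []
  | prev, last, cur :: rest =>
    let v := if prev < t ∧ t ≤ cur then 1 else last + 1
    v :: walkB t cur v rest

def day_counter_helper_alt (vix_measure_list : List Int) (threshold : Int) : List Int :=
  match vix_measure_list with
  | [] => [0]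
  | x :: rest => 0 :: walkB threshold x 0 rest

-- ===== PRECONDITION & SPEC =====
def Spec_day_counter_helper (vix_measure_list : List Int) (threshold : Int) (out : List Int) : Prop := out = day_counter_helper_alt vix_measure_list threshold
instance (vix_measure_list : List Int) (threshold : Int) (out : List Int) : Decidable (Spec_day_counter_helper vix_measure_list threshold out) := by unfold Spec_day_counter_helper; infer_instance

-- ===== CLAIM (what is proved, stated in full; the proofs are below) =====
def Claim_equal_day_counter_helper : Prop := ∀ (vix_measure_list : List Int) (threshold : Int), Dom_day_counter_helper vix_measure_list threshold → Spec_day_counter_helper vix_measure_list threshold (day_counter_helper vix_measure_list threshold)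

-- ===== LEMMAS AND PROOFS =====

-- structural form of A's backward loop: gRec t x l = final state of A's loop on (x :: l)
def gRec (t : Int) : Int → List Int → List Int × List Int × Int
  | _, [] => ([], [], 0)
  | x, y :: ys =>
    let s := gRec t y ys
    if x < t ∧ t ≤ y then (s.1 ++ (s.2.1 ++ [s.2.2 + 1]).reverse, [], 0)
    else (s.1, s.2.1 ++ [s.2.2 + 1], s.2.2 + 1)

lemma gRec_cons (t x y : Int) (ys : List Int) :
    gRec t x (y :: ys) =
      if x < t ∧ t ≤ y then
        ((gRec t y ys).1 ++ ((gRec t y ys).2.1 ++ [(gRec t y ys).2.2 + 1]).reverse, [], 0)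
      else ((gRec t y ys).1, (gRec t y ys).2.1 ++ [(gRec t y ys).2.2 + 1], (gRec t y ys).2.2 + 1) := rfl

lemma walkB_cons (t prev last cur : Int) (rest : List Int) :
    walkB t prev last (cur :: rest) =
      (if prev < t ∧ t ≤ cur then 1 else last + 1)
        :: walkB t cur (if prev < t ∧ t ≤ cur then 1 else last + 1) rest := rfl

-- at indices ≥ 2, a step on (x :: l) is the step at the shifted index on l
lemma stepA_shift (x : Int) (l : List Int) (t : Int) (k : Nat) (s : List Int × List Int × Int) :
    stepA (x :: l) t (k + 2) s = stepA l t (k + 1) s := by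
  unfold stepA
  have h1 : ((k + 2 : Nat) : Int) = ((k + 1 : Nat) : Int) + 1 := by push_cast; ring
  have h2 : ((k + 1 : Nat) : Int) + 1 - 1 = ((k : Nat) : Int) + 1 := by push_cast; ring
  have h3 : ((k + 1 : Nat) : Int) - 1 = ((k : Nat) : Int) := by push_cast; ring
  rw [h1, h2, h3, PySem.List.pyGet?_cons_succ, PySem.List.pyGet?_cons_succ]

lemma stepA_one (x y : Int) (ys : List Int) (t : Int) (s : List Int × List Int × Int) :
    stepA (x :: y :: ys) t 1 s =
      if x < t ∧ t ≤ y then (s.1 ++ (s.2.1 ++ [s.2.2 + 1]).reverse, [], 0)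
      else (s.1, s.2.1 ++ [s.2.2 + 1], s.2.2 + 1) := by
  unfold stepA
  norm_num [PySem.List.pyGet?_zero_cons, show ((1 : Nat) : Int) = ((0 : Nat) : Int) + 1 from by norm_num]

lemma loopA_shift (x : Int) (l : List Int) (t : Int) :
    ∀ (i : Nat) (s : List Int × List Int × Int),
      loopA (x :: l) t (i + 1) s = stepA (x :: l) t 1 (loopA l t i s) := by
  intro i
  induction i with
  | zero => intro s; simp [loopA]
  | succ i ih =>
      intro s
      show loopA (x :: l) t (i + 1) (stepA (x :: l) t (i + 2) s) = _
      rw [stepA_shift, ih]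
      rfl

lemma loopA_eq_gRec (t : Int) : ∀ (l : List Int) (x : Int),
    loopA (x :: l) t l.length ([], [], 0) = gRec t x l := by
  intro l
  induction l with
  | nil => intro x; rfl
  | cons y ys ih =>
      intro x
      show loopA (x :: y :: ys) t (ys.length + 1) ([], [], 0) = _
      rw [loopA_shift, ih y, stepA_one, gRec_cons]

-- the current episode is always [1, 2, …, counter]
def epi (m : Nat) : List Int := (List.range m).map (fun (k : Nat) => (k : Int) + 1)

lemma epi_snoc (m : Nat) : epi (m + 1) = epi m ++ [(m : Int) + 1] := by
  simp [epi, List.range_succ]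

lemma epi_shift (m : Nat) (last : Int) :
    (epi (m + 1)).map (fun v => v + last) = (last + 1) :: (epi m).map (fun v => v + (last + 1)) := by
  simp only [epi, List.range_succ_eq_map, List.map_cons, List.map_map, Nat.cast_zero, zero_add]
  refine List.cons_eq_cons.mpr ⟨by ring, List.map_congr_left fun k _ => ?_⟩
  simp only [Function.comp]; push_cast; ring

-- loop invariant: B's forward walk = current episode (shifted by `last`) ++ flushed days reversed
lemma walkB_inv (t : Int) : ∀ (l : List Int) (x : Int),
    (∀ last : Int, walkB t x last l
        = ((gRec t x l).2.1.map (fun v => v + last)) ++ (gRec t x l).1.reverse)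
    ∧ ∃ m : Nat, (gRec t x l).2.2 = (m : Int) ∧ (gRec t x l).2.1 = epi m := by
  intro l
  induction l with
  | nil => intro x; exact ⟨fun _ => rfl, 0, rfl, rfl⟩
  | cons y ys ih =>
      intro x
      obtain ⟨hwalk, m, hcc, hce⟩ := ih y
      by_cases hup : x < t ∧ t ≤ y
      · refine ⟨fun last => ?_, 0, by simp [gRec_cons, hup], by simp [gRec_cons, hup, epi]⟩
        have h0 : epi (m + 1) = 1 :: (epi m).map (fun v => v + 1) := by
          have := epi_shift m 0
          simpa using this
        rw [walkB_cons, if_pos hup, hwalk 1]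
        simp only [gRec_cons, if_pos hup, List.map_nil, List.nil_append, List.reverse_append,
          List.reverse_reverse, hce, hcc, ← epi_snoc, h0]
        simp
      · refine ⟨fun last => ?_, m + 1, ?_, ?_⟩
        · rw [walkB_cons, if_neg hup, hwalk (last + 1)]
          simp only [gRec_cons, if_neg hup, hce, hcc, ← epi_snoc, epi_shift, List.cons_append]
        · simp [gRec_cons, hup, hcc]
        · simp [gRec_cons, hup, hce, hcc, ← epi_snoc]

-- ===== VERDICT (by name: the statement is the Claim_ definition above) =====
theorem day_counter_helper_spec : Claim_equal_day_counter_helper := by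
  intro xs t _
  show day_counter_helper xs t = day_counter_helper_alt xs t
  cases xs with
  | nil => rfl
  | cons x rest =>
      obtain ⟨hwalk, m, hcc, hce⟩ := walkB_inv t rest x
      show (((loopA (x :: rest) t ((x :: rest).length - 1) ([], [], 0)).1
            ++ (loopA (x :: rest) t ((x :: rest).length - 1) ([], [], 0)).2.1.reverse) ++ [0]).reverse
          = 0 :: walkB t x 0 rest
      have hlen : (x :: rest).length - 1 = rest.length := by simp
      rw [hlen, loopA_eq_gRec, hwalk 0]
      simp
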